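-- pv_equiv track=rewrite | github.com/iLuigi98/UCSD-DSC20 | Homeworks/hw03.py | cipher_map
-- ===== SOURCE A (Python) =====
-- def cipher_map(english_word):
--     """
--     Return a translation of the english word into the local language
--     using the ciphers on the class website.
--     >>> cipher_map('hello')
--     'lippu'
--     >>> cipher_map('today')
--     'xuhec'
--     >>> cipher_map('yesterday')
--     'ciwxivhec'
--     >>> cipher_map('zzz')
--     'ddd'
--     >>> cipher_map('wxyz')
--     'zbcd'
--     >>> cipher_map('aeiou')
--     'eioua'
--     """
--     assert (isinstance(english_word, str)), "argument must be a string"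
--
--     english_lower = english_word.lower()
--     english_list = english_lower.split()
--     out_of_bond_helper_3 = 3;
--     out_of_bond_helper_2 = 2;
--     out_of_bond_helper_1 = 1;
--
--     vowels = ['a', 'e', 'i', 'o', 'u']
--     consonants = ['b','c','d','f','g','h','j','k','l','m','n','p','q','r','s','t','v','w','x','y','z']
--
--     def change_vowel(x):
--     	result = []
--     	for i in range(len(x)):
--     		for j in range(len(vowels)):
--     			if x[i] == vowels[j] and j < len(vowels) - 1:
--     				result.append(vowels[j + 1])
--     				break
--     			elif x[i] == vowels[j] and j == len(vowels) - 1: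
--     				result.append(vowels[0])
--     				break
--     		vowel_counter = 0
--     		for k in range(len(vowels)):
--     			if x[i] == vowels[j]:
--     				vowel_counter += 1
--     		if vowel_counter == 0:
--     			result.append(x[i])
--     	return result
--
--     def change_consonant(x):
--     	result = []
--     	for i in range(len(x)):
--     		for j in range(len(consonants)):
--     			if x[i] == consonants[j] and j < len(consonants)-out_of_bond_helper_3:
--     				result.append(consonants[j + 3])
--     				break
--     			elif x[i]==consonants[j] and j==len(consonants)-out_of_bond_helper_3:
--     				result.append(consonants[0])
--     				break
--     			elif x[i]==consonants[j] and j==len(consonants)-out_of_bond_helper_2: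
--     				result.append(consonants[1])
--     				break
--     			elif x[i]==consonants[j] and j==len(consonants)-out_of_bond_helper_1:
--     				result.append(consonants[2])
--     				break
--     		consonant_counter = 0
--     		for k in range(len(consonants)):
--     			if x[i] == consonants[j]:
--     				consonant_counter += 1
--     		if consonant_counter == 0:
--     			result.append(x[i])
--     	return result
--
--     coded_vowel = list(map(change_vowel, english_list))
--     coded_message = list(map(change_consonant, coded_vowel))
--     answer = ''
--     for i in range(len(coded_message[0])):
--     	answer += coded_message[0][i]
--     return answer
-- ===== SOURCE B (Python) =====
-- _VOWELS = "aeiou"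
-- _CONS = "bcdfghjklmnpqrstvwxyz"
-- _TABLE = str.maketrans(_VOWELS + _CONS,
--                        _VOWELS[1:] + _VOWELS[0] + _CONS[3:] + _CONS[:3])
--
-- def cipher_map(english_word):
--     assert isinstance(english_word, str), "argument must be a string"
--     return english_word.lower().split()[0].translate(_TABLE)
-- ===== Notes on version B (the rewrite author's own statement) =====
-- stated objective: faster
-- what changed: Replaces A's per-character linear scans over the vowel/consonant lists (plus a redundant counter loop per character) by one precomputed 26-letter translation table applied in a single str.translate pass over the first lowercased token.
import Mathlib
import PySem

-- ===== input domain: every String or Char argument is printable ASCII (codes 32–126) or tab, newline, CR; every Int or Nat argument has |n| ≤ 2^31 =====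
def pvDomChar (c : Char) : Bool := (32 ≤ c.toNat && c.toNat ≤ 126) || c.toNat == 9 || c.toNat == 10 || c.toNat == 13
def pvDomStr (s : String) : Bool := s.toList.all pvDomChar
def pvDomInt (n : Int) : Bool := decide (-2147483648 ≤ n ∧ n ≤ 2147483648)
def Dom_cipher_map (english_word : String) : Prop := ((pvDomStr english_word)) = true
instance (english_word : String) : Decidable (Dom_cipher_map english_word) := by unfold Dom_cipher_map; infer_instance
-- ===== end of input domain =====

-- B replaces A's per-character scans over the vowel/consonant lists by one precomputed
-- translation table applied in a single pass over the first lowercased token (idiomatic).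

-- ===== PORT A =====
def pvVowels : List Char := ['a', 'e', 'i', 'o', 'u']
def pvCons : List Char :=
  ['b','c','d','f','g','h','j','k','l','m','n','p','q','r','s','t','v','w','x','y','z']

-- inner `for j in range(len(vowels))` loop of change_vowel: returns the appended char (if a
-- break fired) and the final value of j (Python leaves j at len-1 when the loop runs out).
-- Indices are always in range, so `getD _ ' '` is exact for the Python list indexing.
def vJLoop (c : Char) (j : Nat) : Option Char × Nat :=
  if j < pvVowels.length then
    if c = pvVowels.getD j ' ' ∧ j < pvVowels.length - 1 then
      (some (pvVowels.getD (j + 1) ' '), j)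
    else if c = pvVowels.getD j ' ' ∧ j = pvVowels.length - 1 then
      (some (pvVowels.getD 0 ' '), j)
    else vJLoop c (j + 1)
  else (none, pvVowels.length - 1)
  termination_by pvVowels.length - j

-- body of change_vowel's `for i in range(len(x))` loop for one character x[i]
def changeVowelStep (result : List Char) (c : Char) : List Char :=
  let r := vJLoop c 0
  let result := match r.1 with
    | some v => result ++ [v]
    | none => result
  let counter := (List.range pvVowels.length).foldl
    (fun n _ => if c = pvVowels.getD r.2 ' ' then n + 1 else n) 0
  if counter = 0 then result ++ [c] else result

def change_vowel (x : List Char) : List Char := x.foldl changeVowelStep []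

-- inner `for j in range(len(consonants))` loop of change_consonant
def cJLoop (c : Char) (j : Nat) : Option Char × Nat :=
  if j < pvCons.length then
    if c = pvCons.getD j ' ' ∧ j < pvCons.length - 3 then
      (some (pvCons.getD (j + 3) ' '), j)
    else if c = pvCons.getD j ' ' ∧ j = pvCons.length - 3 then
      (some (pvCons.getD 0 ' '), j)
    else if c = pvCons.getD j ' ' ∧ j = pvCons.length - 2 then
      (some (pvCons.getD 1 ' '), j)
    else if c = pvCons.getD j ' ' ∧ j = pvCons.length - 1 then
      (some (pvCons.getD 2 ' '), j)
    else cJLoop c (j + 1)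
  else (none, pvCons.length - 1)
  termination_by pvCons.length - j

def changeConsStep (result : List Char) (c : Char) : List Char :=
  let r := cJLoop c 0
  let result := match r.1 with
    | some v => result ++ [v]
    | none => result
  let counter := (List.range pvCons.length).foldl
    (fun n _ => if c = pvCons.getD r.2 ' ' then n + 1 else n) 0
  if counter = 0 then result ++ [c] else result

def change_consonant (x : List Char) : List Char := x.foldl changeConsStep []

def cipher_map (english_word : String) : String :=
  let english_lower := PySem.Str.lower english_word
  let english_list := PySem.Str.split₀ english_lower
  let coded_vowel := english_list.map (fun w => change_vowel w.toList)
  let coded_message := coded_vowel.map change_consonant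
  -- coded_message[0]: Pre_ guarantees the list is nonempty (Python raises IndexError otherwise)
  let first := (PySem.List.pyGet? coded_message 0).getD []
  -- `for i in range(len(...)): answer += coded_message[0][i]`
  String.ofList (first.foldl (fun acc c => acc ++ [c]) [])

-- ===== PORT B =====
def pvVowelsB : List Char := ['a','e','i','o','u']
def pvConsB : List Char :=
  ['b','c','d','f','g','h','j','k','l','m','n','p','q','r','s','t','v','w','x','y','z']

-- _TABLE = str.maketrans(_VOWELS + _CONS, _VOWELS[1:] + _VOWELS[0] + _CONS[3:] + _CONS[:3]):
-- an association list keyed by source char (keys are distinct; lookup = first match)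
def pvTable : List (Char × Char) :=
  (pvVowelsB ++ pvConsB).zip
    ((pvVowelsB.drop 1 ++ pvVowelsB.take 1) ++ (pvConsB.drop 3 ++ pvConsB.take 3))

def cipher_map_alt (english_word : String) : String :=
  let w := (PySem.List.pyGet? (PySem.Str.split₀ (PySem.Str.lower english_word)) 0).getD ""
  -- str.translate: each char replaced by its table image, chars not in the table unchanged
  String.ofList (w.toList.map (fun c => (pvTable.lookup c).getD c))

-- ===== PRECONDITION & SPEC =====
-- Pre_ excludes exactly the empty/whitespace-only strings, on which A (coded_message[0])
-- raises IndexError (B's split()[0] raises there too).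
def Pre_cipher_map (english_word : String) : Prop :=
  PySem.Str.split₀ (PySem.Str.lower english_word) ≠ []
instance (english_word : String) : Decidable (Pre_cipher_map english_word) := by
  unfold Pre_cipher_map; infer_instance

def pvWitness_cipher_map : String := "hello"

def Spec_cipher_map (english_word : String) (out : String) : Prop := out = cipher_map_alt english_word
instance (english_word : String) (out : String) : Decidable (Spec_cipher_map english_word out) := by unfold Spec_cipher_map; infer_instance

-- ===== CLAIM (what is proved, stated in full; the proofs are below) =====
def Claim_equal_cipher_map : Prop := ∀ (english_word : String), Dom_cipher_map english_word → Pre_cipher_map english_word → Spec_cipher_map english_word (cipher_map english_word)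

-- ===== LEMMAS AND PROOFS =====

-- per-character image of A's vowel pass
def pvVch (c : Char) : Char := (vJLoop c 0).1.getD c
-- per-character image of A's consonant pass
def pvCch (c : Char) : Char := (cJLoop c 0).1.getD c

lemma changeVowelStep_eq (acc : List Char) (c : Char) :
    changeVowelStep acc c = acc ++ [pvVch c] := by
  by_cases h1 : c = 'a'; · subst h1; simp [changeVowelStep, vJLoop, pvVch, pvVowels]
  by_cases h2 : c = 'e'; · subst h2; simp [changeVowelStep, vJLoop, pvVch, pvVowels]
  by_cases h3 : c = 'i'; · subst h3; simp [changeVowelStep, vJLoop, pvVch, pvVowels]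
  by_cases h4 : c = 'o'; · subst h4; simp [changeVowelStep, vJLoop, pvVch, pvVowels]
  by_cases h5 : c = 'u'; · subst h5; simp [changeVowelStep, vJLoop, pvVch, pvVowels]
  simp [changeVowelStep, vJLoop, pvVch, pvVowels, h1, h2, h3, h4, h5]

lemma changeConsStep_eq (acc : List Char) (c : Char) :
    changeConsStep acc c = acc ++ [pvCch c] := by
  by_cases h1 : c = 'b'; · subst h1; simp [changeConsStep, cJLoop, pvCch, pvCons]
  by_cases h2 : c = 'c'; · subst h2; simp [changeConsStep, cJLoop, pvCch, pvCons]
  by_cases h3 : c = 'd'; · subst h3; simp [changeConsStep, cJLoop, pvCch, pvCons]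
  by_cases h4 : c = 'f'; · subst h4; simp [changeConsStep, cJLoop, pvCch, pvCons]
  by_cases h5 : c = 'g'; · subst h5; simp [changeConsStep, cJLoop, pvCch, pvCons]
  by_cases h6 : c = 'h'; · subst h6; simp [changeConsStep, cJLoop, pvCch, pvCons]
  by_cases h7 : c = 'j'; · subst h7; simp [changeConsStep, cJLoop, pvCch, pvCons]
  by_cases h8 : c = 'k'; · subst h8; simp [changeConsStep, cJLoop, pvCch, pvCons]
  by_cases h9 : c = 'l'; · subst h9; simp [changeConsStep, cJLoop, pvCch, pvCons]
  by_cases h10 : c = 'm'; · subst h10; simp [changeConsStep, cJLoop, pvCch, pvCons]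
  by_cases h11 : c = 'n'; · subst h11; simp [changeConsStep, cJLoop, pvCch, pvCons]
  by_cases h12 : c = 'p'; · subst h12; simp [changeConsStep, cJLoop, pvCch, pvCons]
  by_cases h13 : c = 'q'; · subst h13; simp [changeConsStep, cJLoop, pvCch, pvCons]
  by_cases h14 : c = 'r'; · subst h14; simp [changeConsStep, cJLoop, pvCch, pvCons]
  by_cases h15 : c = 's'; · subst h15; simp [changeConsStep, cJLoop, pvCch, pvCons]
  by_cases h16 : c = 't'; · subst h16; simp [changeConsStep, cJLoop, pvCch, pvCons]
  by_cases h17 : c = 'v'; · subst h17; simp [changeConsStep, cJLoop, pvCch, pvCons]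
  by_cases h18 : c = 'w'; · subst h18; simp [changeConsStep, cJLoop, pvCch, pvCons]
  by_cases h19 : c = 'x'; · subst h19; simp [changeConsStep, cJLoop, pvCch, pvCons]
  by_cases h20 : c = 'y'; · subst h20; simp [changeConsStep, cJLoop, pvCch, pvCons]
  by_cases h21 : c = 'z'; · subst h21; simp [changeConsStep, cJLoop, pvCch, pvCons]
  simp [changeConsStep, cJLoop, pvCch, pvCons, h1, h2, h3, h4, h5, h6, h7, h8, h9, h10,
    h11, h12, h13, h14, h15, h16, h17, h18, h19, h20, h21]

lemma change_vowel_eq_map (x : List Char) : change_vowel x = x.map pvVch := by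
  unfold change_vowel
  have : x.foldl changeVowelStep [] = x.foldl (fun acc c => acc ++ [pvVch c]) [] := by
    congr 1; funext acc c; exact changeVowelStep_eq acc c
  rw [this, PySem.List.foldl_append_singleton_eq_map]; simp

lemma change_consonant_eq_map (x : List Char) : change_consonant x = x.map pvCch := by
  unfold change_consonant
  have : x.foldl changeConsStep [] = x.foldl (fun acc c => acc ++ [pvCch c]) [] := by
    congr 1; funext acc c; exact changeConsStep_eq acc c
  rw [this, PySem.List.foldl_append_singleton_eq_map]; simp

-- the composed per-character map of A equals B's table lookup
lemma perChar (c : Char) : pvCch (pvVch c) = (pvTable.lookup c).getD c := by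
  by_cases h1 : c = 'a'; · subst h1; simp [pvVch, pvCch, vJLoop, cJLoop, pvVowels, pvCons, pvTable, pvVowelsB, pvConsB, List.lookup]
  by_cases h2 : c = 'e'; · subst h2; simp [pvVch, pvCch, vJLoop, cJLoop, pvVowels, pvCons, pvTable, pvVowelsB, pvConsB, List.lookup]
  by_cases h3 : c = 'i'; · subst h3; simp [pvVch, pvCch, vJLoop, cJLoop, pvVowels, pvCons, pvTable, pvVowelsB, pvConsB, List.lookup]
  by_cases h4 : c = 'o'; · subst h4; simp [pvVch, pvCch, vJLoop, cJLoop, pvVowels, pvCons, pvTable, pvVowelsB, pvConsB, List.lookup]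
  by_cases h5 : c = 'u'; · subst h5; simp [pvVch, pvCch, vJLoop, cJLoop, pvVowels, pvCons, pvTable, pvVowelsB, pvConsB, List.lookup]
  by_cases g1 : c = 'b'; · subst g1; simp [pvVch, pvCch, vJLoop, cJLoop, pvVowels, pvCons, pvTable, pvVowelsB, pvConsB, List.lookup]
  by_cases g2 : c = 'c'; · subst g2; simp [pvVch, pvCch, vJLoop, cJLoop, pvVowels, pvCons, pvTable, pvVowelsB, pvConsB, List.lookup]
  by_cases g3 : c = 'd'; · subst g3; simp [pvVch, pvCch, vJLoop, cJLoop, pvVowels, pvCons, pvTable, pvVowelsB, pvConsB, List.lookup]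
  by_cases g4 : c = 'f'; · subst g4; simp [pvVch, pvCch, vJLoop, cJLoop, pvVowels, pvCons, pvTable, pvVowelsB, pvConsB, List.lookup]
  by_cases g5 : c = 'g'; · subst g5; simp [pvVch, pvCch, vJLoop, cJLoop, pvVowels, pvCons, pvTable, pvVowelsB, pvConsB, List.lookup]
  by_cases g6 : c = 'h'; · subst g6; simp [pvVch, pvCch, vJLoop, cJLoop, pvVowels, pvCons, pvTable, pvVowelsB, pvConsB, List.lookup]
  by_cases g7 : c = 'j'; · subst g7; simp [pvVch, pvCch, vJLoop, cJLoop, pvVowels, pvCons, pvTable, pvVowelsB, pvConsB, List.lookup]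
  by_cases g8 : c = 'k'; · subst g8; simp [pvVch, pvCch, vJLoop, cJLoop, pvVowels, pvCons, pvTable, pvVowelsB, pvConsB, List.lookup]
  by_cases g9 : c = 'l'; · subst g9; simp [pvVch, pvCch, vJLoop, cJLoop, pvVowels, pvCons, pvTable, pvVowelsB, pvConsB, List.lookup]
  by_cases g10 : c = 'm'; · subst g10; simp [pvVch, pvCch, vJLoop, cJLoop, pvVowels, pvCons, pvTable, pvVowelsB, pvConsB, List.lookup]
  by_cases g11 : c = 'n'; · subst g11; simp [pvVch, pvCch, vJLoop, cJLoop, pvVowels, pvCons, pvTable, pvVowelsB, pvConsB, List.lookup]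
  by_cases g12 : c = 'p'; · subst g12; simp [pvVch, pvCch, vJLoop, cJLoop, pvVowels, pvCons, pvTable, pvVowelsB, pvConsB, List.lookup]
  by_cases g13 : c = 'q'; · subst g13; simp [pvVch, pvCch, vJLoop, cJLoop, pvVowels, pvCons, pvTable, pvVowelsB, pvConsB, List.lookup]
  by_cases g14 : c = 'r'; · subst g14; simp [pvVch, pvCch, vJLoop, cJLoop, pvVowels, pvCons, pvTable, pvVowelsB, pvConsB, List.lookup]
  by_cases g15 : c = 's'; · subst g15; simp [pvVch, pvCch, vJLoop, cJLoop, pvVowels, pvCons, pvTable, pvVowelsB, pvConsB, List.lookup]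
  by_cases g16 : c = 't'; · subst g16; simp [pvVch, pvCch, vJLoop, cJLoop, pvVowels, pvCons, pvTable, pvVowelsB, pvConsB, List.lookup]
  by_cases g17 : c = 'v'; · subst g17; simp [pvVch, pvCch, vJLoop, cJLoop, pvVowels, pvCons, pvTable, pvVowelsB, pvConsB, List.lookup]
  by_cases g18 : c = 'w'; · subst g18; simp [pvVch, pvCch, vJLoop, cJLoop, pvVowels, pvCons, pvTable, pvVowelsB, pvConsB, List.lookup]
  by_cases g19 : c = 'x'; · subst g19; simp [pvVch, pvCch, vJLoop, cJLoop, pvVowels, pvCons, pvTable, pvVowelsB, pvConsB, List.lookup]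
  by_cases g20 : c = 'y'; · subst g20; simp [pvVch, pvCch, vJLoop, cJLoop, pvVowels, pvCons, pvTable, pvVowelsB, pvConsB, List.lookup]
  by_cases g21 : c = 'z'; · subst g21; simp [pvVch, pvCch, vJLoop, cJLoop, pvVowels, pvCons, pvTable, pvVowelsB, pvConsB, List.lookup]
  have hv : pvVch c = c := by
    simp [pvVch, vJLoop, pvVowels, h1, h2, h3, h4, h5]
  rw [hv]
  have hc : pvCch c = c := by
    simp [pvCch, cJLoop, pvCons, g1, g2, g3, g4, g5, g6, g7, g8, g9, g10, g11, g12, g13,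
      g14, g15, g16, g17, g18, g19, g20, g21]
  rw [hc]
  have b1 : (c == 'a') = false := beq_eq_false_iff_ne.mpr h1
  have b2 : (c == 'e') = false := beq_eq_false_iff_ne.mpr h2
  have b3 : (c == 'i') = false := beq_eq_false_iff_ne.mpr h3
  have b4 : (c == 'o') = false := beq_eq_false_iff_ne.mpr h4
  have b5 : (c == 'u') = false := beq_eq_false_iff_ne.mpr h5
  have b6 : (c == 'b') = false := beq_eq_false_iff_ne.mpr g1
  have b7 : (c == 'c') = false := beq_eq_false_iff_ne.mpr g2
  have b8 : (c == 'd') = false := beq_eq_false_iff_ne.mpr g3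
  have b9 : (c == 'f') = false := beq_eq_false_iff_ne.mpr g4
  have b10 : (c == 'g') = false := beq_eq_false_iff_ne.mpr g5
  have b11 : (c == 'h') = false := beq_eq_false_iff_ne.mpr g6
  have b12 : (c == 'j') = false := beq_eq_false_iff_ne.mpr g7
  have b13 : (c == 'k') = false := beq_eq_false_iff_ne.mpr g8
  have b14 : (c == 'l') = false := beq_eq_false_iff_ne.mpr g9
  have b15 : (c == 'm') = false := beq_eq_false_iff_ne.mpr g10
  have b16 : (c == 'n') = false := beq_eq_false_iff_ne.mpr g11
  have b17 : (c == 'p') = false := beq_eq_false_iff_ne.mpr g12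
  have b18 : (c == 'q') = false := beq_eq_false_iff_ne.mpr g13
  have b19 : (c == 'r') = false := beq_eq_false_iff_ne.mpr g14
  have b20 : (c == 's') = false := beq_eq_false_iff_ne.mpr g15
  have b21 : (c == 't') = false := beq_eq_false_iff_ne.mpr g16
  have b22 : (c == 'v') = false := beq_eq_false_iff_ne.mpr g17
  have b23 : (c == 'w') = false := beq_eq_false_iff_ne.mpr g18
  have b24 : (c == 'x') = false := beq_eq_false_iff_ne.mpr g19
  have b25 : (c == 'y') = false := beq_eq_false_iff_ne.mpr g20
  have b26 : (c == 'z') = false := beq_eq_false_iff_ne.mpr g21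
  have ht : pvTable.lookup c = none := by
    simp [pvTable, pvVowelsB, pvConsB, List.lookup, b1, b2, b3, b4, b5, b6, b7, b8, b9, b10, b11, b12, b13, b14, b15, b16, b17, b18, b19, b20, b21, b22, b23, b24, b25, b26]
  rw [ht]; rfl

-- pyGet? at index 0 of a nonempty list
lemma pyGet?_cons_zero {α : Type} (a : α) (l : List α) :
    PySem.List.pyGet? (a :: l) 0 = some a := by
  simp [PySem.List.pyGet?, PySem.List.pyIdx?]

-- ===== VERDICT (by name: the statement is the Claim_ definition above) =====
theorem cipher_map_spec : Claim_equal_cipher_map := by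
  intro s _ hpre
  unfold Pre_cipher_map at hpre
  obtain ⟨w, rest, hL⟩ := List.exists_cons_of_ne_nil hpre
  unfold Spec_cipher_map cipher_map cipher_map_alt
  simp only [hL, List.map_cons, pyGet?_cons_zero, Option.getD_some]
  rw [change_vowel_eq_map, change_consonant_eq_map, List.map_map,
    PySem.List.foldl_append_singleton, List.nil_append]
  congr 1
  exact List.map_congr_left (fun c _ => perChar c)
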